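-- pv_equiv track=rewrite | github.com/Ardrito/TwoTowerSearch | data/preprocessing.py | build_doc_table
-- ===== SOURCE A (Python) =====
-- def build_doc_table(query_doc_pairs):
--     doc_table = {}         # {doc_id: doc_text}
--     doc_to_id = {}         # {doc_text: doc_id}
--     doc_id_counter = 0
--
--     for pair in query_doc_pairs:
--         for passage in pair['all_passages']:
--             if passage not in doc_to_id:
--                 doc_id = f"d{doc_id_counter:06d}"
--                 doc_to_id[passage] = doc_id
--                 doc_table[doc_id] = passage
--                 doc_id_counter += 1
--     return doc_table, doc_to_id
-- ===== SOURCE B (Python) =====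
-- def build_doc_table(query_doc_pairs):
--     # Flatten, then find each passage's FIRST-occurrence index without any
--     # membership test: scan the enumerated list in reverse, overwriting, so the
--     # surviving value per passage is its earliest index. Sorting the passages by
--     # that index recovers first-seen order; IDs are then assigned by position.
--     flat = [p for pair in query_doc_pairs for p in pair['all_passages']]
--     first = {}
--     for i, p in reversed(list(enumerate(flat))):
--         first[p] = i
--     ordered = sorted(first, key=first.get)
--     doc_table = {}
--     doc_to_id = {}
--     for n, p in enumerate(ordered):
--         doc_id = f"d{n:06d}"
--         doc_table[doc_id] = p
--         doc_to_id[p] = doc_id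
--     return doc_table, doc_to_id
-- ===== Notes on version B (the rewrite author's own statement) =====
-- stated objective: alternative
-- what changed: Replaces A's interleaved dedup-and-assign loop (membership test + three mutable accumulators) with a min-index algorithm: a reverse overwrite pass records each passage's first-occurrence index with no membership test at all, a sort by that index recovers first-seen order, and IDs are assigned positionally.
import Mathlib
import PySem

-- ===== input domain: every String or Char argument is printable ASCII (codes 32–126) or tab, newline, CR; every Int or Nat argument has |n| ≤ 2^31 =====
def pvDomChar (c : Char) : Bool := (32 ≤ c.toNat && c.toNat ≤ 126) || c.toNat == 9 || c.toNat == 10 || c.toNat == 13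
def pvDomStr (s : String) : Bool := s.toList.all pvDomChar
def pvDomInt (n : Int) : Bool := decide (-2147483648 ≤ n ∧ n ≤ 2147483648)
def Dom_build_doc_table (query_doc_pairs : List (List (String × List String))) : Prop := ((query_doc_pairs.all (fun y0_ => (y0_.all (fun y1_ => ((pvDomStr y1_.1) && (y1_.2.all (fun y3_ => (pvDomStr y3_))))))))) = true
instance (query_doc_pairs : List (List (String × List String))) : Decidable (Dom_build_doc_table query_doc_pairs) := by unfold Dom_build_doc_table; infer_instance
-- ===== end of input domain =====

-- B replaces A's interleaved dedup-and-assign loop by a min-index algorithm: a reverse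
-- overwrite pass records each passage's first-occurrence index (no membership test),
-- a sort by that index recovers first-seen order, and IDs are assigned positionally;
-- objective: alternative. Equivalence of the RETURN value is proved on Pre_ (every pair
-- has the 'all_passages' key; A raises KeyError otherwise).

-- f"d{n:06d}" for n ≥ 0 (both Pythons contain this same f-string)
def pvFmtId (n : Int) : String := "d" ++ PySem.Str.zfill (PySem.Int.toStr n) 6

-- ===== PORT A =====
def build_doc_table (query_doc_pairs : List (List (String × List String))) : (List (String × String)) × (List (String × String)) :=
  let st : PySem.Dict String String × PySem.Dict String String × Int :=
    query_doc_pairs.foldl (fun st pair =>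
      ((PySem.Dict.mk pair).getD "all_passages" []).foldl (fun st passage =>
        if st.2.1.contains passage then st
        else (st.1.insert (pvFmtId st.2.2) passage,
              st.2.1.insert passage (pvFmtId st.2.2),
              st.2.2 + 1)) st)
      (PySem.Dict.empty, PySem.Dict.empty, 0)
  (st.1.items, st.2.1.items)

-- ===== PORT B =====
def build_doc_table_alt (query_doc_pairs : List (List (String × List String))) : (List (String × String)) × (List (String × String)) :=
  let flat := query_doc_pairs.flatMap (fun pair => (PySem.Dict.mk pair).getD "all_passages" [])
  -- for i, p in reversed(list(enumerate(flat))): first[p] = i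
  let first : PySem.Dict String Int :=
    (PySem.List.enumerate flat).reverse.foldl (fun d ip => d.insert ip.2 ip.1) PySem.Dict.empty
  -- sorted(first, key=first.get); every key is present, so first.get(p) = first[p] (ported as getD, exact here)
  let ordered := PySem.List.sorted first.keys (fun p => first.getD p 0) false
  let st :=
    (PySem.List.enumerate ordered).foldl
      (fun st np => (st.1.insert (pvFmtId np.1) np.2, st.2.insert np.2 (pvFmtId np.1)))
      ((PySem.Dict.empty : PySem.Dict String String), (PySem.Dict.empty : PySem.Dict String String))
  (st.1.items, st.2.items)

-- ===== PRECONDITION & SPEC =====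
-- Pre_ excludes exactly the inputs where Python A raises KeyError: a pair without the 'all_passages' key.
def Pre_build_doc_table (query_doc_pairs : List (List (String × List String))) : Prop :=
  ∀ pair ∈ query_doc_pairs, (PySem.Dict.mk pair).contains "all_passages" = true
instance (query_doc_pairs : List (List (String × List String))) : Decidable (Pre_build_doc_table query_doc_pairs) := by unfold Pre_build_doc_table; infer_instance
def pvWitness_build_doc_table : (List (List (String × List String))) :=
  [[("all_passages", ["x", "y"])], [("all_passages", ["y", "z"])]]
def Spec_build_doc_table (query_doc_pairs : List (List (String × List String))) (out : (List (String × String)) × (List (String × String))) : Prop := out = build_doc_table_alt query_doc_pairs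
instance (query_doc_pairs : List (List (String × List String))) (out : (List (String × String)) × (List (String × String))) : Decidable (Spec_build_doc_table query_doc_pairs out) := by unfold Spec_build_doc_table; infer_instance

-- ===== CLAIM (what is proved, stated in full; the proofs are below) =====
def Claim_equal_build_doc_table : Prop := ∀ (query_doc_pairs : List (List (String × List String))), Dom_build_doc_table query_doc_pairs → Pre_build_doc_table query_doc_pairs → Spec_build_doc_table query_doc_pairs (build_doc_table query_doc_pairs)

-- ===== LEMMAS AND PROOFS =====

-- A's state after processing a distinct prefix u of passages
def pvTable (u : List String) : PySem.Dict String String :=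
  (PySem.List.enumerate u).foldl (fun d ip => d.insert (pvFmtId ip.1) ip.2) PySem.Dict.empty
def pvInv (u : List String) : PySem.Dict String String :=
  (PySem.List.enumerate u).foldl (fun d ip => d.insert ip.2 (pvFmtId ip.1)) PySem.Dict.empty
def pvState (u : List String) : PySem.Dict String String × PySem.Dict String String × Int :=
  (pvTable u, pvInv u, (u.length : Int))

def pvStep (st : PySem.Dict String String × PySem.Dict String String × Int) (passage : String) :
    PySem.Dict String String × PySem.Dict String String × Int :=
  if st.2.1.contains passage then st
  else (st.1.insert (pvFmtId st.2.2) passage,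
        st.2.1.insert passage (pvFmtId st.2.2),
        st.2.2 + 1)

lemma pvInv_contains (u : List String) (x : String) :
    (pvInv u).contains x = decide (x ∈ u) := by
  have h : (pvInv u).keys = PySem.Set.update PySem.Dict.empty.keys ((PySem.List.enumerate u).map (·.2)) :=
    PySem.Dict.keys_foldl_insert_key (PySem.List.enumerate u) (·.2) (fun d ip => pvFmtId ip.1) _
  by_cases hx : x ∈ u
  · have : x ∈ (pvInv u).keys := by
      rw [h, PySem.List.map_snd_enumerate]
      exact (PySem.Set.mem_update _ _ _).mpr (Or.inr hx)
    simp [((pvInv u).contains_iff_mem_keys x).mpr this, hx]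
  · have : x ∉ (pvInv u).keys := by
      rw [h, PySem.List.map_snd_enumerate]
      intro hmem
      rcases (PySem.Set.mem_update _ _ _).mp hmem with h1 | h2
      · simp [PySem.Dict.keys_empty] at h1
      · exact hx h2
    have hc : ¬ (pvInv u).contains x = true := fun hc => this (((pvInv u).contains_iff_mem_keys x).mp hc)
    simp [hx, Bool.eq_false_iff.mpr hc]

lemma pvTable_append (u : List String) (x : String) :
    pvTable (u ++ [x]) = (pvTable u).insert (pvFmtId (u.length : Int)) x := by
  unfold pvTable
  rw [PySem.List.enumerate_append, List.foldl_append]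
  simp [PySem.List.enumerate_cons, PySem.List.enumerate_nil]

lemma pvInv_append (u : List String) (x : String) :
    pvInv (u ++ [x]) = (pvInv u).insert x (pvFmtId (u.length : Int)) := by
  unfold pvInv
  rw [PySem.List.enumerate_append, List.foldl_append]
  simp [PySem.List.enumerate_cons, PySem.List.enumerate_nil]

lemma pvStep_state (u : List String) (x : String) :
    pvStep (pvState u) x = pvState (PySem.Set.add u x) := by
  unfold pvStep
  by_cases hx : x ∈ u
  · simp [pvInv_contains, hx, pvState, PySem.Set.add, PySem.Set.contains_eq_listContains]
  · have hc : PySem.Set.add u x = u ++ [x] := by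
      simp [PySem.Set.add, PySem.Set.contains_eq_listContains, hx]
    simp only [pvState, pvInv_contains u x, hx, decide_false, Bool.false_eq_true, if_false, hc]
    rw [pvTable_append, pvInv_append]
    simp

lemma pvFold_state (xs : List String) : ∀ (u : List String),
    xs.foldl pvStep (pvState u) = pvState (PySem.Set.update u xs) := by
  induction xs with
  | nil => intro u; simp [PySem.Set.update]
  | cons x xs ih =>
    intro u
    rw [List.foldl_cons, pvStep_state u x, ih (PySem.Set.add u x)]
    simp [PySem.Set.update]

lemma pvFoldl_flat {α : Type} (g : α → List String) (l : List α)
    (init : PySem.Dict String String × PySem.Dict String String × Int) :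
    l.foldl (fun st a => (g a).foldl pvStep st) init = (l.flatMap g).foldl pvStep init := by
  induction l generalizing init with
  | nil => simp
  | cons a l ih => simp [List.flatMap_cons, List.foldl_append, ih]

-- B's reverse-overwrite dict: getD gives the FIRST-occurrence index
lemma pvGetD_revFold (xs : List String) : ∀ (s : Int) (d : PySem.Dict String Int) (p : String),
    ((PySem.List.enumerate xs s).reverse.foldl (fun d ip => d.insert ip.2 ip.1) d).getD p 0
      = if p ∈ xs then s + (xs.idxOf p : Int) else d.getD p 0 := by
  induction xs with
  | nil => intro s d p; simp [PySem.List.enumerate_nil]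
  | cons x xs ih =>
    intro s d p
    rw [PySem.List.enumerate_cons, List.reverse_cons, List.foldl_append]
    simp only [List.foldl_cons, List.foldl_nil]
    by_cases hp : p = x
    · subst hp
      rw [PySem.Dict.getD_insert_self]
      simp [List.idxOf_cons_self]
    · rw [PySem.Dict.getD_insert_of_ne _ _ _ hp, ih (s + 1) d p]
      by_cases hm : p ∈ xs
      · simp only [hm, if_true, List.mem_cons, hp, false_or]
        rw [List.idxOf_cons_ne _ (fun h => hp h.symm)]
        push_cast
        ring_nf
      · simp [hm, hp]

-- the ordered dedup is strictly increasing in first-occurrence index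
lemma pvOfList_pairwise_idxOf (xs : List String) :
    (PySem.Set.ofList xs).Pairwise (fun a b => xs.idxOf a < xs.idxOf b) := by
  induction xs with
  | nil => simp [PySem.Set.ofList_nil]
  | cons x xs ih =>
    rw [PySem.Set.ofList_cons]
    constructor
    · intro b hb
      have hbx : b ≠ x := ((PySem.Set.mem_discard _ _ _).mp hb).2
      rw [List.idxOf_cons_self, List.idxOf_cons_ne _ (fun h => hbx h.symm)]
      omega
    · have hsub : (PySem.Set.discard (PySem.Set.ofList xs) x).Sublist (PySem.Set.ofList xs) := by
        simp [PySem.Set.discard]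
      have hpw := (ih.sublist hsub)
      refine hpw.imp_of_mem ?_
      intro a b ha hb hab
      have hax : a ≠ x := ((PySem.Set.mem_discard _ _ _).mp ha).2
      have hbx : b ≠ x := ((PySem.Set.mem_discard _ _ _).mp hb).2
      rw [List.idxOf_cons_ne _ (fun h => hax h.symm), List.idxOf_cons_ne _ (fun h => hbx h.symm)]
      omega

-- ===== VERDICT (by name: the statement is the Claim_ definition above) =====
theorem build_doc_table_spec : Claim_equal_build_doc_table := by
  intro qdp _ _
  show build_doc_table qdp = build_doc_table_alt qdp
  simp only [build_doc_table, build_doc_table_alt]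
  set flat := qdp.flatMap (fun pair => (PySem.Dict.mk pair).getD "all_passages" []) with hflat
  -- A's loop reaches pvState (Set.ofList flat)
  have hA :
      qdp.foldl (fun st pair =>
        ((PySem.Dict.mk pair).getD "all_passages" []).foldl (fun st passage =>
          if st.2.1.contains passage then st
          else (st.1.insert (pvFmtId st.2.2) passage,
                st.2.1.insert passage (pvFmtId st.2.2),
                st.2.2 + 1)) st)
        ((PySem.Dict.empty : PySem.Dict String String), (PySem.Dict.empty : PySem.Dict String String), (0 : Int))
      = pvState (PySem.Set.ofList flat) := by
    have h0 : pvState [] = ((PySem.Dict.empty : PySem.Dict String String), (PySem.Dict.empty : PySem.Dict String String), (0 : Int)) := rfl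
    have hstep : (fun (st : PySem.Dict String String × PySem.Dict String String × Int) passage =>
        if st.2.1.contains passage then st
        else (st.1.insert (pvFmtId st.2.2) passage,
              st.2.1.insert passage (pvFmtId st.2.2),
              st.2.2 + 1)) = pvStep := rfl
    rw [hstep, ← h0,
      pvFoldl_flat (fun pair => (PySem.Dict.mk pair).getD "all_passages" []) qdp (pvState []),
      pvFold_state]
    rw [PySem.Set.ofList_eq_foldl, PySem.Set.update]
  rw [hA]
  -- B's ordered list is Set.ofList flat
  set first : PySem.Dict String Int :=
    (PySem.List.enumerate flat).reverse.foldl (fun d ip => d.insert ip.2 ip.1) PySem.Dict.empty with hfirst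
  have hkeys : first.keys = PySem.Set.ofList flat.reverse := by
    rw [hfirst, PySem.Dict.keys_foldl_insert_key (PySem.List.enumerate flat).reverse (·.2)
        (fun d ip => ip.1) PySem.Dict.empty]
    rw [List.map_reverse, PySem.List.map_snd_enumerate, PySem.Dict.keys_empty,
      PySem.Set.update_nil_left]
  have hord : PySem.List.sorted first.keys (fun p => first.getD p 0) false = PySem.Set.ofList flat := by
    apply PySem.List.sorted_eq_of_perm_of_pairwise_lt
    · apply (List.perm_ext_iff_of_nodup (PySem.Set.nodup_ofList flat) ?_).mpr
      · intro x
        rw [hkeys]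
        simp [PySem.Set.mem_ofList]
      · rw [hkeys]; exact PySem.Set.nodup_ofList _
    · have hpw := pvOfList_pairwise_idxOf flat
      refine hpw.imp_of_mem ?_
      intro a b ha hb hab
      have ha' : a ∈ flat := (PySem.Set.mem_ofList _ _).mp ha
      have hb' : b ∈ flat := (PySem.Set.mem_ofList _ _).mp hb
      rw [hfirst, pvGetD_revFold flat 0 PySem.Dict.empty a, pvGetD_revFold flat 0 PySem.Dict.empty b]
      simp only [ha', hb', if_true, zero_add]
      exact_mod_cast hab
  rw [hord]
  -- B's final paired loop is (pvTable, pvInv)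
  rw [PySem.List.foldl_prod_mk
      (f := fun (d : PySem.Dict String String) (np : Int × String) => d.insert (pvFmtId np.1) np.2)
      (g := fun (d : PySem.Dict String String) (np : Int × String) => d.insert np.2 (pvFmtId np.1))]
  rfl
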